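-- pv_equiv track=rewrite | github.com/gmltmd23/Algorithm-Study | 2022 Study/Implementation/[구현] 프로그래머스_LEVEL2_삼각 달팽이.py | solution
-- ===== SOURCE A (Python) =====
-- def solution(n):
--     pyramid = [[0] * n for _ in range(n)]
--     answer = []
--     x, y = -1, 0
--     number = 1
--
--     for i in range(n):
--         for j in range(i, n):
--             if i % 3 == 0:
--                 x += 1
--             elif i % 3 == 1:
--                 y += 1
--             elif i % 3 == 2:
--                 x, y = (x - 1), (y - 1)
--             pyramid[x][y] = number
--             number += 1
--
--     for i in range(n):
--         for j in range(n):
--             if pyramid[i][j] != 0: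
--                 answer.append(pyramid[i][j])
--
--     return answer
-- ===== SOURCE B (Python) =====
-- def solution(n):
--     if n <= 0:
--         return []
--     tri = [[0] * (r + 1) for r in range(n)]
--     top, off, size, num = 0, 0, n, 1
--     while size > 0:
--         bottom = top + size - 1
--         for k in range(size):            # left edge, top to bottom
--             tri[top + k][off] = num + k
--         for k in range(size - 1):        # bottom edge, left to right
--             tri[bottom][off + 1 + k] = num + size + k
--         for k in range(size - 2):        # inner diagonal, bottom to top
--             tri[bottom - 1 - k][off + size - 2 - k] = num + 2 * size - 1 + k
--         top, off, size, num = top + 2, off + 1, size - 3, num + 3 * size - 3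
--     return [v for row in tri for v in row if v]
-- ===== Notes on version B (the rewrite author's own statement) =====
-- stated objective: alternative
-- what changed: B abandons A's cell-by-cell direction-switching walk over a square n×n grid followed by a second n² nonzero-scanning pass; instead it peels the triangle layer by layer, filling the left edge, bottom edge and inner diagonal of each concentric sub-triangle of a jagged triangular array with three straight loops, and flattens the jagged rows at the end.
import Mathlib
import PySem

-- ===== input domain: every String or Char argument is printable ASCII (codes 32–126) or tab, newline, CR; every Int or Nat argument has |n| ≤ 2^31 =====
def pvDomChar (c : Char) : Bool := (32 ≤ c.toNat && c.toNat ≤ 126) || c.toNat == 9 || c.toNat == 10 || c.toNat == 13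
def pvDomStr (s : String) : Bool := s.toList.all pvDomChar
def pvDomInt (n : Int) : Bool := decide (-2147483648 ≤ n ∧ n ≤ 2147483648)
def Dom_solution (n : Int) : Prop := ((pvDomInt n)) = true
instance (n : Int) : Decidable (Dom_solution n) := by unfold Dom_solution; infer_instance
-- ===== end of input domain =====

-- B replaces A's per-cell direction walk over a square n×n grid (plus a second pass
-- scanning all n² cells for nonzero entries) by peeling the triangle layer by layer:
-- each round fills the left edge, bottom edge and inner diagonal of the current
-- sub-triangle of a jagged triangular array with three straight loops, then the jagged
-- rows are flattened.  Objective: alternative (layered construction, about half the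
-- cells allocated and scanned; same O(n²) total work).

-- ===== PORT A =====
-- one iteration of the fill loop's body (the `let xy` mirrors Python's x/y update
-- before the assignment `pyramid[x][y] = number`); state = (pyramid, x, y, number)
def solutionStep (i : Int) (st : List (List Int) × Int × Int × Int) :
    List (List Int) × Int × Int × Int :=
  let xy : Int × Int :=
    if PySem.Int.mod i 3 == 0 then (st.2.1 + 1, st.2.2.1)
    else if PySem.Int.mod i 3 == 1 then (st.2.1, st.2.2.1 + 1)
    else if PySem.Int.mod i 3 == 2 then (st.2.1 - 1, st.2.2.1 - 1)
    else (st.2.1, st.2.2.1)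
  (PySem.List.pySetD st.1 xy.1
     (PySem.List.pySetD (PySem.List.pyGetD st.1 xy.1 []) xy.2 st.2.2.2),
   xy.1, xy.2, st.2.2.2 + 1)

-- the fill pass: state (pyramid, x, y, number) after the double loop
def solutionFill (n : Int) : List (List Int) × Int × Int × Int :=
  (PySem.List.pyRange 0 n 1).foldl
    (fun (st : List (List Int) × Int × Int × Int) i =>
      (PySem.List.pyRange i n 1).foldl (fun st _j => solutionStep i st) st)
    ((PySem.List.pyRange 0 n 1).map (fun _ => PySem.List.pyRepeat [(0 : Int)] n),
     (-1 : Int), (0 : Int), (1 : Int))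

def solution (n : Int) : List Int :=
  let st := solutionFill n
  (PySem.List.pyRange 0 n 1).foldl (fun answer i =>
    (PySem.List.pyRange 0 n 1).foldl (fun answer j =>
      if PySem.List.pyGetD (PySem.List.pyGetD st.1 i []) j (0 : Int) ≠ 0 then
        answer ++ [PySem.List.pyGetD (PySem.List.pyGetD st.1 i []) j (0 : Int)]
      else answer) answer) []

-- ===== PORT B =====
-- the while-loop of Source B (three straight loops per layer, then the inner triangle);
-- recursion measured by the integer `size`, which Python decreases by 3 each round
def solutionAltFill (tri : List (List Int)) (top off size num : Int) : List (List Int) :=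
  if h : size ≤ 0 then tri
  else
    solutionAltFill
      ((PySem.List.pyRange 0 (size - 2) 1).foldl (fun t k =>
        PySem.List.pySetD t (top + size - 1 - 1 - k)
          (PySem.List.pySetD (PySem.List.pyGetD t (top + size - 1 - 1 - k) [])
            (off + size - 2 - k) (num + 2 * size - 1 + k)))
        ((PySem.List.pyRange 0 (size - 1) 1).foldl (fun t k =>
          PySem.List.pySetD t (top + size - 1)
            (PySem.List.pySetD (PySem.List.pyGetD t (top + size - 1) [])
              (off + 1 + k) (num + size + k)))
          ((PySem.List.pyRange 0 size 1).foldl (fun t k =>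
            PySem.List.pySetD t (top + k)
              (PySem.List.pySetD (PySem.List.pyGetD t (top + k) []) off (num + k))) tri)))
      (top + 2) (off + 1) (size - 3) (num + 3 * size - 3)
termination_by size.toNat
decreasing_by omega

def solution_alt (n : Int) : List Int :=
  if n ≤ 0 then []
  else
    (solutionAltFill
      ((PySem.List.pyRange 0 n 1).map (fun r => PySem.List.pyRepeat [(0 : Int)] (r + 1)))
      0 0 n 1).flatMap (fun row => row.filter (fun v => v ≠ 0))

-- ===== PRECONDITION & SPEC =====
def Spec_solution (n : Int) (out : List Int) : Prop := out = solution_alt n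
instance (n : Int) (out : List Int) : Decidable (Spec_solution n out) := by unfold Spec_solution; infer_instance

-- ===== CLAIM (what is proved, stated in full; the proofs are below) =====
def Claim_equal_solution : Prop := ∀ (n : Int), Dom_solution n → Spec_solution n (solution n)

-- ===== LEMMAS AND PROOFS =====

-- one write "grid[r][c] = v" (Python list assignment), and a whole list of writes
def pvWr (g : List (List Int)) (w : (Int × Int) × Int) : List (List Int) :=
  PySem.List.pySetD g w.1.1 (PySem.List.pySetD (PySem.List.pyGetD g w.1.1 []) w.1.2 w.2)

def pvApply (g : List (List Int)) (ws : List ((Int × Int) × Int)) : List (List Int) :=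
  ws.foldl pvWr g

-- the writes of one straight leg: k-th write at (x+dx*(k+1), y+dy*(k+1)), value num+k
def pvLeg (x y dx dy num : Int) (L : Nat) : List ((Int × Int) × Int) :=
  (List.range L).map (fun k : Nat =>
    ((x + dx * ((k : Int) + 1), y + dy * ((k : Int) + 1)), num + (k : Int)))

-- A's step direction as a function of the leg index i
def pvDir (i : Int) : Int × Int :=
  if PySem.Int.mod i 3 == 0 then (1, 0)
  else if PySem.Int.mod i 3 == 1 then (0, 1)
  else if PySem.Int.mod i 3 == 2 then (-1, -1)
  else (0, 0)

-- A's write sequence: legs i, i+1, …, the first of length `rem`, each one shorter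
def pvLegs : Nat → Int → Int → Int → Int → List ((Int × Int) × Int)
  | 0, _, _, _, _ => []
  | (r + 1), i, x, y, num =>
      pvLeg x y (pvDir i).1 (pvDir i).2 num (r + 1) ++
      pvLegs r (i + 1) (x + (pvDir i).1 * (r + 1)) (y + (pvDir i).2 * (r + 1)) (num + (r + 1))

-- the final (x, y, number) state of A's fill loop
def pvFin : Nat → Int → Int → Int → Int → Int × Int × Int
  | 0, _, x, y, num => (x, y, num)
  | (r + 1), i, x, y, num =>
      pvFin r (i + 1) (x + (pvDir i).1 * (r + 1)) (y + (pvDir i).2 * (r + 1)) (num + (r + 1))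

-- B's write sequence: one boundary layer (left edge, bottom edge, inner diagonal) …
def pvLayer (top off num : Int) (m : Nat) : List ((Int × Int) × Int) :=
  pvLeg (top - 1) off 1 0 num m ++
  pvLeg (top + m - 1) off 0 1 (num + m) (m - 1) ++
  pvLeg (top + m - 1) (off + m - 1) (-1) (-1) (num + 2 * m - 1) (m - 2)

-- … then the inner triangle
def pvW (top off num : Int) (m : Nat) : List ((Int × Int) × Int) :=
  if m = 0 then []
  else pvLayer top off num m ++ pvW (top + 2) (off + 1) (num + 3 * m - 3) (m - 3)
termination_by m
decreasing_by omega

lemma pvApply_nil (g : List (List Int)) : pvApply g [] = g := rfl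

lemma pvApply_cons (g : List (List Int)) (w : (Int × Int) × Int) (ws : List ((Int × Int) × Int)) :
    pvApply g (w :: ws) = pvApply (pvWr g w) ws := rfl

lemma pvApply_append (g : List (List Int)) (a b : List ((Int × Int) × Int)) :
    pvApply g (a ++ b) = pvApply (pvApply g a) b := by
  simp [pvApply, List.foldl_append]

lemma pvLeg_zero (x y dx dy num : Int) : pvLeg x y dx dy num 0 = [] := rfl

lemma pvLeg_succ (x y dx dy num : Int) (L : Nat) :
    pvLeg x y dx dy num (L + 1) =
      ((x + dx, y + dy), num) :: pvLeg (x + dx) (y + dy) dx dy (num + 1) L := by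
  unfold pvLeg
  rw [List.range_succ_eq_map, List.map_cons, List.map_map]
  refine congrArg₂ List.cons ?_ ?_
  · simp
  · refine List.map_congr_left ?_
    intro k _
    simp only [Function.comp, Nat.succ_eq_add_one, Prod.mk.injEq]
    push_cast
    refine ⟨⟨by ring, by ring⟩, by ring⟩

lemma mem_pvLeg {x y dx dy num : Int} {L : Nat} {w : (Int × Int) × Int}
    (h : w ∈ pvLeg x y dx dy num L) :
    ∃ k : Nat, k < L ∧ w = ((x + dx * ((k : Int) + 1), y + dy * ((k : Int) + 1)), num + (k : Int)) := by
  unfold pvLeg at h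
  obtain ⟨k, hk, hw⟩ := List.mem_map.1 h
  exact ⟨k, List.mem_range.1 hk, hw.symm⟩

lemma pvStep_eq (i x y : Int) :
    (if PySem.Int.mod i 3 == 0 then (x + 1, y)
     else if PySem.Int.mod i 3 == 1 then (x, y + 1)
     else if PySem.Int.mod i 3 == 2 then (x - 1, y - 1)
     else (x, y))
    = (x + (pvDir i).1, y + (pvDir i).2) := by
  unfold pvDir
  split_ifs <;> simp [Prod.mk.injEq] <;> omega

-- A's inner loop over any list is one leg of writes
lemma pvA_inner (i : Int) : ∀ (l : List Int) (g : List (List Int)) (x y num : Int),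
    l.foldl (fun st _j => solutionStep i st) (g, x, y, num)
    = (pvApply g (pvLeg x y (pvDir i).1 (pvDir i).2 num l.length),
       x + (pvDir i).1 * l.length, y + (pvDir i).2 * l.length, num + l.length) := by
  intro l
  induction l with
  | nil => intro g x y num; simp [pvApply, pvLeg]
  | cons a l ih =>
    intro g x y num
    rw [List.foldl_cons]
    have hstep : solutionStep i (g, x, y, num) =
        (pvWr g ((x + (pvDir i).1, y + (pvDir i).2), num),
         x + (pvDir i).1, y + (pvDir i).2, num + 1) := by
      unfold solutionStep pvWr
      simp only [pvStep_eq]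
    rw [hstep, ih]
    rw [List.length_cons, pvLeg_succ, pvApply_cons]
    simp only [Prod.mk.injEq]
    refine ⟨by trivial, by push_cast; ring, by push_cast; ring, by push_cast; ring⟩

-- A's outer loop is the concatenation of the legs
lemma pvA_outer (n : Int) : ∀ (rem : Nat) (i : Int) (g : List (List Int)) (x y num : Int),
    (n - i).toNat = rem →
    (PySem.List.pyRange i n 1).foldl
      (fun (st : List (List Int) × Int × Int × Int) i =>
        (PySem.List.pyRange i n 1).foldl (fun st _j => solutionStep i st) st)
      (g, x, y, num)
    = (pvApply g (pvLegs rem i x y num), pvFin rem i x y num) := by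
  intro rem
  induction rem with
  | zero =>
    intro i g x y num h
    rw [PySem.List.pyRange_one_eq_nil (by omega)]
    simp [pvLegs, pvApply, pvFin]
  | succ r ih =>
    intro i g x y num h
    rw [PySem.List.pyRange_one_cons (by omega), List.foldl_cons]
    rw [pvA_inner i (PySem.List.pyRange i n 1) g x y num]
    have hl : (PySem.List.pyRange i n 1).length = r + 1 := by
      rw [PySem.List.length_pyRange_one]; omega
    rw [hl]
    rw [ih (i + 1) _ _ _ _ (by omega)]
    show _ = (pvApply g (pvLeg x y (pvDir i).1 (pvDir i).2 num (r + 1) ++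
        pvLegs r (i + 1) (x + (pvDir i).1 * (r + 1)) (y + (pvDir i).2 * (r + 1))
          (num + (r + 1))), _)
    rw [pvApply_append]
    rfl

-- grouping A's legs three at a time gives B's layers
lemma pvLegs_eq_pvW : ∀ (m : Nat) (top off num i : Int), 0 ≤ i → PySem.Int.mod i 3 = 0 →
    pvLegs m i (top - 1) off num = pvW top off num m := by
  intro m
  induction m using Nat.strong_induction_on with
  | _ m ih =>
    intro top off num i hi hm
    have him : i % 3 = 0 := by
      rwa [PySem.Int.mod_eq_emod_of_pos (by norm_num)] at hm
    have hd0 : pvDir i = (1, 0) := by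
      simp [pvDir, him]
    have hd1 : pvDir (i + 1) = (0, 1) := by
      have h1 : (i + 1) % 3 = 1 := by omega
      simp [pvDir, h1]
    have hd2 : pvDir (i + 1 + 1) = (-1, -1) := by
      have h2 : (i + 1 + 1) % 3 = 2 := by omega
      simp [pvDir, h2]
    rcases m with _ | (_ | (_ | k))
    · rw [pvW]; simp [pvLegs]
    · rw [pvW]; rw [if_neg (by omega)]
      rw [show (1 : Nat) - 3 = 0 from rfl, pvW, if_pos rfl]
      simp only [pvLegs, pvLayer, hd0]
      simp [pvLeg]
    · rw [pvW, if_neg (by omega), show (2 : Nat) - 3 = 0 from rfl, pvW, if_pos rfl, pvLayer,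
          show (2 : Nat) - 1 = 1 from rfl, show (2 : Nat) - 2 = 0 from rfl]
      simp only [pvLegs, hd0, hd1, pvLeg_zero, List.append_nil]
      push_cast
      ring_nf
    · -- m = k + 3
      simp only [pvLegs, hd0, hd1, hd2]
      rw [pvW, if_neg (by omega), pvLayer]
      rw [show (k + 3 : Nat) - 1 = k + 2 from rfl, show (k + 3 : Nat) - 2 = k + 1 from rfl,
          show (k + 3 : Nat) - 3 = k from rfl]
      rw [← ih k (by omega) (top + 2) (off + 1) (num + 3 * ((k + 3 : Nat) : Int) - 3)
            (i + 1 + 1 + 1) (by omega)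
            (by rw [PySem.Int.mod_eq_emod_of_pos (by norm_num)]; omega)]
      simp only [List.append_assoc]
      push_cast
      ring_nf

-- B's fill recursion applies exactly the pvW writes
lemma pvApply_leg (g : List (List Int)) (x y dx dy num : Int) (L : Nat) :
    pvApply g (pvLeg x y dx dy num L) =
      (List.range L).foldl
        (fun (t : List (List Int)) (k : Nat) =>
          pvWr t ((x + dx * ((k : Int) + 1), y + dy * ((k : Int) + 1)), num + (k : Int))) g := by
  rw [pvApply, pvLeg, List.foldl_map]

lemma pvB_fill : ∀ (m : Nat) (size : Int), size.toNat = m →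
    ∀ (tri : List (List Int)) (top off num : Int),
    solutionAltFill tri top off size num = pvApply tri (pvW top off num m) := by
  intro m
  induction m using Nat.strong_induction_on with
  | _ m ih =>
    intro size hm tri top off num
    rw [solutionAltFill]
    by_cases h : size ≤ 0
    · have hm0 : m = 0 := by omega
      subst hm0
      rw [dif_pos h, pvW, if_pos rfl, pvApply_nil]
    · rw [dif_neg h]
      have hm1 : 1 ≤ m := by omega
      have hms : ((m : Nat) : Int) = size := by omega
      rw [pvW, if_neg (by omega), pvLayer, hms]
      rw [ih (m - 3) (by omega) (size - 3) (by omega)]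
      rw [pvApply_append, pvApply_append, pvApply_append]
      have h1 : (PySem.List.pyRange 0 size 1).foldl (fun t k =>
            PySem.List.pySetD t (top + k)
              (PySem.List.pySetD (PySem.List.pyGetD t (top + k) []) off (num + k))) tri
          = pvApply tri (pvLeg (top - 1) off 1 0 num m) := by
        rw [pvApply_leg, PySem.List.pyRange_one, show (size - 0).toNat = m by omega,
            List.foldl_map]
        refine PySem.List.foldl_congr_mem _ _ _ _ ?_
        intro t k _
        unfold pvWr
        rw [show top - 1 + 1 * ((k : Int) + 1) = top + (0 + (k : Int)) by ring,
            show off + 0 * ((k : Int) + 1) = off by ring,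
            show num + (k : Int) = num + (0 + (k : Int)) by ring]
      have h2 : ∀ t0, (PySem.List.pyRange 0 (size - 1) 1).foldl (fun t k =>
            PySem.List.pySetD t (top + size - 1)
              (PySem.List.pySetD (PySem.List.pyGetD t (top + size - 1) [])
                (off + 1 + k) (num + size + k))) t0
          = pvApply t0 (pvLeg (top + size - 1) off 0 1 (num + size) (m - 1)) := by
        intro t0
        rw [pvApply_leg, PySem.List.pyRange_one, show (size - 1 - 0).toNat = m - 1 by omega,
            List.foldl_map]
        refine PySem.List.foldl_congr_mem _ _ _ _ ?_
        intro t k _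
        unfold pvWr
        rw [show top + size - 1 + 0 * ((k : Int) + 1) = top + size - 1 by ring,
            show off + 1 * ((k : Int) + 1) = off + 1 + (0 + (k : Int)) by ring,
            show num + size + (k : Int) = num + size + (0 + (k : Int)) by ring]
      have h3 : ∀ t0, (PySem.List.pyRange 0 (size - 2) 1).foldl (fun t k =>
            PySem.List.pySetD t (top + size - 1 - 1 - k)
              (PySem.List.pySetD (PySem.List.pyGetD t (top + size - 1 - 1 - k) [])
                (off + size - 2 - k) (num + 2 * size - 1 + k))) t0
          = pvApply t0 (pvLeg (top + size - 1) (off + size - 1) (-1) (-1)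
              (num + 2 * size - 1) (m - 2)) := by
        intro t0
        rw [pvApply_leg, PySem.List.pyRange_one, show (size - 2 - 0).toNat = m - 2 by omega,
            List.foldl_map]
        refine PySem.List.foldl_congr_mem _ _ _ _ ?_
        intro t k _
        unfold pvWr
        rw [show top + size - 1 + -1 * ((k : Int) + 1) = top + size - 1 - 1 - (0 + (k : Int)) by ring,
            show off + size - 1 + -1 * ((k : Int) + 1) = off + size - 2 - (0 + (k : Int)) by ring,
            show num + 2 * size - 1 + (k : Int) = num + 2 * size - 1 + (0 + (k : Int)) by ring]
      rw [h1, h2, h3]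

-- all pvW writes land strictly inside the triangle
lemma pvW_bounds : ∀ (m : Nat) (top off num : Int), 0 ≤ off → top = 2 * off →
    ∀ w ∈ pvW top off num m,
      0 ≤ w.1.2 ∧ w.1.2 ≤ w.1.1 ∧ w.1.1 < top + m := by
  intro m
  induction m using Nat.strong_induction_on with
  | _ m ih =>
    intro top off num hoff htop w hw
    rcases Nat.eq_zero_or_pos m with hm0 | hm1
    · subst hm0; rw [pvW, if_pos rfl] at hw; simp at hw
    · rw [pvW, if_neg (by omega), pvLayer] at hw
      simp only [List.append_assoc, List.mem_append] at hw
      rcases hw with hw | hw | hw | hw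
      · obtain ⟨k, hk, rfl⟩ := mem_pvLeg hw
        subst htop; simp only []; omega
      · obtain ⟨k, hk, rfl⟩ := mem_pvLeg hw
        subst htop; simp only []; omega
      · obtain ⟨k, hk, rfl⟩ := mem_pvLeg hw
        subst htop; simp only []; omega
      · by_cases h3 : 3 ≤ m
        · have := ih (m - 3) (by omega) (top + 2) (off + 1) (num + 3 * m - 3)
            (by omega) (by omega) w hw
          omega
        · have hz : m - 3 = 0 := by omega
          rw [hz, pvW, if_pos rfl] at hw
          simp at hw

-- getD after set (both lists here have the index in range)
lemma pvGetD_set {α : Type} (l : List α) (j : Nat) (x d : α) (hj : j < l.length) (r : Nat) :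
    (l.set j x).getD r d = if j = r then x else l.getD r d := by
  by_cases hjr : j = r
  · subst hjr
    rw [List.getD_eq_getElem?_getD, List.getElem?_set_self hj]
    simp
  · rw [List.getD_eq_getElem?_getD, List.getElem?_set_ne hjr, ← List.getD_eq_getElem?_getD]
    simp [hjr]

-- the pointwise invariant between the square grid and the jagged triangle
def pvInv (n : Nat) (g t : List (List Int)) : Prop :=
  g.length = n ∧ t.length = n ∧
  (∀ r : Nat, r < n → (g.getD r []).length = n) ∧
  (∀ r : Nat, r < n → (t.getD r []).length = r + 1) ∧
  (∀ r c : Nat, r < n → c ≤ r → (g.getD r []).getD c 0 = (t.getD r []).getD c 0) ∧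
  (∀ r c : Nat, r < n → r < c → (g.getD r []).getD c 0 = 0)

lemma pvInv_wr {n : Nat} {g t : List (List Int)} (h : pvInv n g t)
    (rn cn : Nat) (v : Int) (hr : rn < n) (hc : cn ≤ rn) :
    pvInv n (pvWr g ((rn, cn), v)) (pvWr t ((rn, cn), v)) := by
  obtain ⟨hg, ht, hgrow, htrow, heq, hz⟩ := h
  unfold pvWr
  simp only [PySem.List.pyGetD_natCast,
    PySem.List.pySetD_of_nonneg _ _ (Int.natCast_nonneg _), Int.toNat_natCast]
  have hrg : rn < g.length := by omega
  have hrt : rn < t.length := by omega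
  refine ⟨by simp [hg], by simp [ht], ?_, ?_, ?_, ?_⟩
  · intro r hrn
    rw [pvGetD_set _ _ _ _ hrg]
    split_ifs with he
    · subst he; rw [List.length_set]; exact hgrow rn hr
    · exact hgrow r hrn
  · intro r hrn
    rw [pvGetD_set _ _ _ _ hrt]
    split_ifs with he
    · subst he; rw [List.length_set]; exact htrow rn hr
    · exact htrow r hrn
  · intro r c hrn hcr
    rw [pvGetD_set _ _ _ _ hrg, pvGetD_set _ _ _ _ hrt]
    split_ifs with he
    · subst he
      have hcg : cn < (g.getD rn []).length := by rw [hgrow rn hr]; omega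
      have hct : cn < (t.getD rn []).length := by rw [htrow rn hr]; omega
      rw [pvGetD_set _ _ _ _ hcg, pvGetD_set _ _ _ _ hct]
      split_ifs with he2
      · rfl
      · exact heq rn c hr hcr
    · exact heq r c hrn hcr
  · intro r c hrn hrc
    rw [pvGetD_set _ _ _ _ hrg]
    split_ifs with he
    · subst he
      have hcg : cn < (g.getD rn []).length := by rw [hgrow rn hr]; omega
      rw [pvGetD_set _ _ _ _ hcg]
      split_ifs with he2
      · omega
      · exact hz rn c hr hrc
    · exact hz r c hrn hrc

lemma pvInv_apply {n : Nat} (ws : List ((Int × Int) × Int)) :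
    ∀ {g t : List (List Int)},
    (∀ w ∈ ws, 0 ≤ w.1.2 ∧ w.1.2 ≤ w.1.1 ∧ w.1.1 < (n : Int)) →
    pvInv n g t → pvInv n (pvApply g ws) (pvApply t ws) := by
  induction ws with
  | nil => intro g t _ h; exact h
  | cons w ws ih =>
    intro g t hw h
    obtain ⟨⟨r, c⟩, v⟩ := w
    obtain ⟨h1, h2, h3⟩ := hw _ (List.mem_cons_self)
    simp only at h1 h2 h3
    rw [pvApply_cons, pvApply_cons]
    have hr : r = ((r.toNat : Nat) : Int) := by omega
    have hc : c = ((c.toNat : Nat) : Int) := by omega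
    rw [hr, hc]
    exact ih (fun w hmem => hw w (List.mem_cons_of_mem _ hmem))
      (pvInv_wr h r.toNat c.toNat v (by omega) (by omega))

-- filtering a full row of the square grid = filtering the jagged row
lemma pvFilter_row_eq (ra rb : List Int) (k N : Nat) (hla : ra.length = N)
    (hlb : rb.length = k + 1) (hk : k < N)
    (heq : ∀ c : Nat, c ≤ k → ra.getD c 0 = rb.getD c 0)
    (hz : ∀ c : Nat, k < c → ra.getD c 0 = 0) :
    ra.filter (fun v => decide (v ≠ 0)) = rb.filter (fun v => decide (v ≠ 0)) := by
  have hsplit : ra = ra.take (k + 1) ++ ra.drop (k + 1) := (List.take_append_drop _ _).symm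
  rw [hsplit, List.filter_append]
  have htake : ra.take (k + 1) = rb := by
    refine List.ext_getElem ?_ ?_
    · simp [hla, hlb]; omega
    · intro i h1 h2
      rw [List.getElem_take]
      have hiN : i < N := by omega
      have := heq i (by simp [hlb] at h2; omega)
      rw [List.getD_eq_getElem ra 0 (by omega), List.getD_eq_getElem rb 0 (by omega)] at this
      exact this
  have hdrop : (ra.drop (k + 1)).filter (fun v => decide (v ≠ 0)) = [] := by
    rw [List.filter_eq_nil_iff]
    intro a ha
    obtain ⟨i, hi, rfl⟩ := List.mem_iff_getElem.1 ha
    rw [List.getElem_drop]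
    have hlt : k + 1 + i < N := by simp [hla] at hi ⊢; omega
    have := hz (k + 1 + i) (by omega)
    rw [List.getD_eq_getElem ra 0 (by omega)] at this
    simp [this]
  rw [htake, hdrop, List.append_nil]

-- scanning one full row for nonzero entries
lemma pvScan_row (row : List Int) (n : Int) (hlen : ((row.length : Nat) : Int) = n)
    (acc : List Int) :
    (PySem.List.pyRange 0 n 1).foldl (fun ans j =>
      if PySem.List.pyGetD row j (0 : Int) ≠ 0 then ans ++ [PySem.List.pyGetD row j (0 : Int)]
      else ans) acc
    = acc ++ row.filter (fun v => decide (v ≠ 0)) := by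
  rw [← hlen]
  rw [PySem.List.foldl_pyRange_zero_pyGetD' row 0
    (fun ans v => if v ≠ 0 then ans ++ [v] else ans) acc]
  exact PySem.List.foldl_append_ite_eq_filter _ _ _

lemma pvFlatMap_congr (l : List Int) (f g : Int → List Int) (h : ∀ i ∈ l, f i = g i) :
    l.flatMap f = l.flatMap g := by
  induction l with
  | nil => rfl
  | cons a l ih =>
    rw [List.flatMap_cons, List.flatMap_cons, h a (List.mem_cons_self),
        ih (fun i hi => h i (List.mem_cons_of_mem _ hi))]

-- ===== VERDICT: the main equivalence =====
theorem solution_spec : Claim_equal_solution := by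
  intro n _
  unfold Spec_solution
  by_cases hn : n ≤ 0
  · simp [solution, solution_alt, PySem.List.pyRange_one_eq_nil hn, hn]
  · replace hn : 0 < n := by omega
    have hn0 : ¬ n ≤ 0 := by omega
    set N := n.toNat with hN
    have hNn : ((N : Nat) : Int) = n := by omega
    -- the two initial containers
    set g0 : List (List Int) :=
      (PySem.List.pyRange 0 n 1).map (fun _ => PySem.List.pyRepeat [(0 : Int)] n) with hg0
    set t0 : List (List Int) :=
      (PySem.List.pyRange 0 n 1).map (fun r => PySem.List.pyRepeat [(0 : Int)] (r + 1)) with ht0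
    set G : List (List Int) := pvApply g0 (pvW 0 0 1 N) with hG
    set T : List (List Int) := pvApply t0 (pvW 0 0 1 N) with hT
    -- B's fill pass produces T
    have hBfill : solutionAltFill t0 0 0 n 1 = T :=
      pvB_fill N n (by omega) t0 0 0 1
    -- the invariant holds initially …
    have hInv0 : pvInv N g0 t0 := by
      have hrowg : ∀ r : Nat, r < N → g0.getD r [] = List.replicate N 0 := by
        intro r hr
        rw [hg0, List.getD_eq_getElem _ _
          (by simp [PySem.List.length_pyRange_one]; omega)]
        rw [List.getElem_map, PySem.List.pyRepeat_singleton]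
      have hrowt : ∀ r : Nat, r < N → t0.getD r [] = List.replicate (r + 1) 0 := by
        intro r hr
        rw [ht0, List.getD_eq_getElem _ _
          (by simp [PySem.List.length_pyRange_one]; omega)]
        rw [List.getElem_map, PySem.List.getElem_pyRange_one, PySem.List.pyRepeat_singleton]
        congr 1
        omega
      have hrep : ∀ (m c : Nat), (List.replicate m (0 : Int)).getD c 0 = 0 := by
        intro m c
        by_cases hcm : c < m
        · rw [List.getD_eq_getElem _ _ (by simp; omega), List.getElem_replicate]
        · rw [List.getD_eq_default _ _ (by simp; omega)]
      refine ⟨?_, ?_, ?_, ?_, ?_, ?_⟩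
      · simp only [hg0, List.length_map, PySem.List.length_pyRange_one]; omega
      · simp only [ht0, List.length_map, PySem.List.length_pyRange_one]; omega
      · intro r hr; rw [hrowg r hr]; simp
      · intro r hr; rw [hrowt r hr]; simp
      · intro r c hr _; rw [hrowg r hr, hrowt r hr, hrep, hrep]
      · intro r c hr _; rw [hrowg r hr, hrep]
    -- … hence finally
    have hInv : pvInv N G T := by
      rw [hG, hT]
      refine pvInv_apply _ ?_ hInv0
      intro w hw
      have := pvW_bounds N 0 0 1 le_rfl (by ring) w hw
      omega
    obtain ⟨hGlen, hTlen, hGrow, hTrow, hCell, hZero⟩ := hInv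
    -- A's output
    have hfill : (solutionFill n).1 = G := by
      rw [solutionFill, ← hg0]
      rw [pvA_outer n N 0 g0 (-1) 0 1 (by omega)]
      have hlw := pvLegs_eq_pvW N 0 0 1 0 (by norm_num) (by decide)
      rw [show (0 : Int) - 1 = -1 by ring] at hlw
      rw [hG, hlw]
    have hcongA : ∀ (acc : List Int), ∀ i ∈ PySem.List.pyRange 0 n 1,
        (PySem.List.pyRange 0 n 1).foldl (fun answer j =>
          if PySem.List.pyGetD (PySem.List.pyGetD G i []) j (0 : Int) ≠ 0 then
            answer ++ [PySem.List.pyGetD (PySem.List.pyGetD G i []) j (0 : Int)]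
          else answer) acc
        = acc ++ (PySem.List.pyGetD G i []).filter (fun v => decide (v ≠ 0)) := by
      intro acc i hi
      obtain ⟨hi0, hin⟩ := PySem.List.mem_pyRange_one.mp hi
      have hik : i = ((i.toNat : Nat) : Int) := by omega
      rw [hik, PySem.List.pyGetD_natCast]
      exact pvScan_row _ n (by rw [hGrow i.toNat (by omega)]; exact hNn) acc
    have hA : solution n =
        (PySem.List.pyRange 0 n 1).flatMap
          (fun i => (PySem.List.pyGetD G i []).filter (fun v => decide (v ≠ 0))) := by
      simp only [solution]
      rw [hfill]
      rw [PySem.List.foldl_congr_mem (PySem.List.pyRange 0 n 1) _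
        (fun answer i => answer ++ (PySem.List.pyGetD G i []).filter (fun v => decide (v ≠ 0)))
        [] hcongA]
      rw [PySem.List.foldl_append_eq_flatMap, List.nil_append]
    -- B's output
    have hTmap : (PySem.List.pyRange 0 n 1).map (fun j => PySem.List.pyGetD T j []) = T := by
      have h := PySem.List.map_pyGetD_pyRange_zero' T ([] : List Int)
      rw [show ((T.length : Nat) : Int) = n by rw [hTlen]; exact hNn] at h
      exact h
    have hB : solution_alt n =
        (PySem.List.pyRange 0 n 1).flatMap
          (fun i => (PySem.List.pyGetD T i []).filter (fun v => decide (v ≠ 0))) := by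
      rw [solution_alt, if_neg hn0, ← ht0, hBfill]
      have hsplit : (PySem.List.pyRange 0 n 1).flatMap
          (fun i => (PySem.List.pyGetD T i []).filter (fun v => decide (v ≠ 0)))
          = T.flatMap (fun row => row.filter (fun v => decide (v ≠ 0))) := by
        conv_rhs => rw [← hTmap]
        rw [List.flatMap_map]
      rw [hsplit]
    -- the rows agree after filtering
    have hrows : ∀ i ∈ PySem.List.pyRange 0 n 1,
        (PySem.List.pyGetD G i []).filter (fun v => decide (v ≠ 0))
        = (PySem.List.pyGetD T i []).filter (fun v => decide (v ≠ 0)) := by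
      intro i hi
      obtain ⟨hi0, hin⟩ := PySem.List.mem_pyRange_one.mp hi
      have hik : i = ((i.toNat : Nat) : Int) := by omega
      set k := i.toNat with hk
      have hkN : k < N := by omega
      rw [hik, PySem.List.pyGetD_natCast, PySem.List.pyGetD_natCast]
      refine pvFilter_row_eq _ _ k N (hGrow k hkN) (hTrow k hkN) hkN ?_ ?_
      · intro c hc; exact hCell k c hkN hc
      · intro c hc
        by_cases hcN : c < N
        · exact hZero k c hkN hc
        · exact List.getD_eq_default _ _ (by rw [hGrow k hkN]; omega)
    rw [hA, hB]
    exact pvFlatMap_congr _ _ _ hrows
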